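-- pv_equiv track=rewrite | github.com/bigshanedogg/torch-transformer-from-scratch | transformer/utils/common.py | split_segment_by_turn
-- ===== SOURCE A (Python) =====
-- def split_segment_by_turn(utterances, turn_ids):
--     sequence = []
--     segment = []
--     first_turn_id = turn_ids[0]
--     replied = False
--     for idx, (turn_id, utterance) in enumerate(zip(turn_ids, utterances)):
--         if replied and turn_id == first_turn_id:
--             sequence.append(segment)
--             segment = []
--             replied = False
--
--         segment.append(utterance)
--         if turn_id != first_turn_id: replied = True
--     sequence.append(segment)
--     return sequence
-- ===== SOURCE B (Python) =====
-- def split_segment_by_turn(utterances, turn_ids):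
--     first = turn_ids[0]
--     n = min(len(turn_ids), len(utterances))
--     bounds = [i for i in range(1, n) if turn_ids[i] == first and turn_ids[i - 1] != first]
--     us = utterances[:n]
--     return [us[a:b] for a, b in zip([0] + bounds, bounds + [n])]
-- ===== Notes on version B (the rewrite author's own statement) =====
-- stated objective: simpler
-- what changed: Replaced A's single stateful pass with a 'replied' flag by a two-phase decomposition: first compute the list of boundary indices (positions where the first speaker's turn id reappears after another speaker), then slice the truncated utterance list between consecutive boundaries.
import Mathlib
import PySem

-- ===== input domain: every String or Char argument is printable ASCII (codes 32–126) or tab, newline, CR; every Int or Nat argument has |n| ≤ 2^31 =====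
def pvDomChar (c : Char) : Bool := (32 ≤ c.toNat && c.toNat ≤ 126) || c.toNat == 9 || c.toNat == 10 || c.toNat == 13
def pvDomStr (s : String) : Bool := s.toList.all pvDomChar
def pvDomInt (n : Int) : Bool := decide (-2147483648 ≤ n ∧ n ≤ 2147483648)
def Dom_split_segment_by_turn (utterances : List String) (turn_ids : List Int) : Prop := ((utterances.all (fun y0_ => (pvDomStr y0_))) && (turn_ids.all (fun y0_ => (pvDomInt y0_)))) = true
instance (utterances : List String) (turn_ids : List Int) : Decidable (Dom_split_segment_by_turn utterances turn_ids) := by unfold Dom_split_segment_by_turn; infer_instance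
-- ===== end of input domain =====

/- B replaces A's single stateful pass (the `replied` flag) by a two-phase decomposition —
   compute the boundary indices, then slice the utterances between consecutive boundaries —
   for clarity (objective: simpler); same return value on every input where A returns. -/


-- ===== PORT A =====
-- the for-loop over zip(turn_ids, utterances) with state (sequence, segment, replied)
def pvA_loop (first : Int) (seq : List (List String)) (seg : List String) (replied : Bool) :
    List (Int × String) → List (List String)
  | [] => seq ++ [seg]
  | (t, u) :: rest =>
    let st := if replied && (t == first) then (seq ++ [seg], ([] : List String), false)
              else (seq, seg, replied)
    pvA_loop first st.1 (st.2.1 ++ [u]) (if t != first then true else st.2.2) rest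

def split_segment_by_turn (utterances : List String) (turn_ids : List Int) : List (List String) :=
  match PySem.List.pyGet? turn_ids 0 with
  | none => []   -- turn_ids[0] raises IndexError on []; excluded by Pre_
  | some first => pvA_loop first [] [] false (turn_ids.zip utterances)

-- ===== PORT B =====
def split_segment_by_turn_alt (utterances : List String) (turn_ids : List Int) : List (List String) :=
  match PySem.List.pyGet? turn_ids 0 with
  | none => []   -- turn_ids[0] raises IndexError on []; excluded by Pre_
  | some first =>
    let n : Int := min (turn_ids.length : Int) (utterances.length : Int)
    -- [i for i in range(1, n) if turn_ids[i] == first and turn_ids[i-1] != first]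
    -- (both indices are in range for every i produced, so the plain default-0 read is exact)
    let bounds := (PySem.List.pyRange 1 n 1).filter
      (fun i => PySem.List.pyGetD turn_ids i 0 == first && PySem.List.pyGetD turn_ids (i - 1) 0 != first)
    let us := PySem.List.slice utterances none (some n)
    (((0 : Int) :: bounds).zip (bounds ++ [n])).map
      (fun ab => PySem.List.slice us (some ab.1) (some ab.2))

-- ===== PRECONDITION & SPEC =====
-- Pre_ excludes exactly the empty turn_ids, on which A raises IndexError at turn_ids[0].
def Pre_split_segment_by_turn (utterances : List String) (turn_ids : List Int) : Prop :=
  turn_ids ≠ []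
instance (utterances : List String) (turn_ids : List Int) : Decidable (Pre_split_segment_by_turn utterances turn_ids) := by unfold Pre_split_segment_by_turn; infer_instance
def pvWitness_split_segment_by_turn : List String × List Int := (["a", "b", "c"], [1, 2, 1])

def Spec_split_segment_by_turn (utterances : List String) (turn_ids : List Int) (out : List (List String)) : Prop := out = split_segment_by_turn_alt utterances turn_ids
instance (utterances : List String) (turn_ids : List Int) (out : List (List String)) : Decidable (Spec_split_segment_by_turn utterances turn_ids out) := by unfold Spec_split_segment_by_turn; infer_instance

-- ===== CLAIM (what is proved, stated in full; the proofs are below) =====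
def Claim_equal_split_segment_by_turn : Prop := ∀ (utterances : List String) (turn_ids : List Int), Dom_split_segment_by_turn utterances turn_ids → Pre_split_segment_by_turn utterances turn_ids → Spec_split_segment_by_turn utterances turn_ids (split_segment_by_turn utterances turn_ids)

-- ===== LEMMAS AND PROOFS =====

-- Common reference shape: one pass over the zipped pairs, carrying the previous turn id.
def segsAux (first prev : Int) (seg : List String) : List (Int × String) → List (List String)
  | [] => [seg]
  | (t, u) :: rest =>
    if prev ≠ first ∧ t = first then seg :: segsAux first t [u] rest
    else segsAux first t (seg ++ [u]) rest

-- Boundary positions of a turn-id list (where a new segment starts), relative form.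
def pvBnds (first prev : Int) : List Int → List Nat
  | [] => []
  | t :: rest =>
    (if prev ≠ first ∧ t = first then [0] else []) ++ (pvBnds first t rest).map Nat.succ

-- Cut a list at the given increasing cut points, starting from position p.
def pvChop (us : List String) : Nat → List Nat → List (List String)
  | p, [] => [us.drop p]
  | p, b :: bs => ((us.drop p).take (b - p)) :: pvChop us b bs

theorem pvA_loop_eq (first : Int) : ∀ (z : List (Int × String)) (seq : List (List String))
    (seg : List String) (prev : Int),
    pvA_loop first seq seg (decide (prev ≠ first)) z = seq ++ segsAux first prev seg z := by
  intro z
  induction z with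
  | nil => intro seq seg prev; simp [pvA_loop, segsAux]
  | cons p rest ih =>
    obtain ⟨t, u⟩ := p
    intro seq seg prev
    by_cases hp : prev = first <;> by_cases ht : t = first <;>
      simp only [pvA_loop, segsAux, hp, ht, ne_eq, not_true_eq_false, not_false_eq_true,
        and_true, and_false, if_true, if_neg, bne_self_eq_false, decide_true, decide_false]
    · have := ih seq (seg ++ [u]) first
      simpa using this
    · have := ih seq (seg ++ [u]) t
      simp [ht] at this
      simpa [bne, ht] using this
    · have := ih (seq ++ [seg]) [u] first
      simp at this
      simp [this]
    · have := ih seq (seg ++ [u]) t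
      simp [ht] at this
      simpa [bne, ht, beq_iff_eq, hp] using this

theorem pvChop_shift (u : String) : ∀ (bs : List Nat) (us : List String) (p : Nat),
    pvChop (u :: us) (p + 1) (bs.map Nat.succ) = pvChop us p bs := by
  intro bs
  induction bs with
  | nil => intro us p; simp [pvChop]
  | cons b bs ih => intro us p; simp [pvChop, ih, Nat.succ_sub_succ]

theorem segsAux_eq_chop (first : Int) : ∀ (z : List (Int × String)) (prev : Int) (seg : List String),
    segsAux first prev seg z =
      match pvBnds first prev (z.map Prod.fst) with
      | [] => [seg ++ z.map Prod.snd]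
      | b :: bs => (seg ++ (z.map Prod.snd).take b) :: pvChop (z.map Prod.snd) b bs := by
  intro z
  induction z with
  | nil => intro prev seg; simp [segsAux, pvBnds]
  | cons p rest ih =>
    obtain ⟨t, u⟩ := p
    intro prev seg
    by_cases hb : prev ≠ first ∧ t = first
    · simp only [segsAux, pvBnds, List.map_cons, if_pos hb]
      rw [ih t [u]]
      cases h : pvBnds first t (rest.map Prod.fst) with
      | nil => simp [pvChop]
      | cons b bs => simp [pvChop, pvChop_shift]
    · simp only [segsAux, pvBnds, List.map_cons, if_neg hb]
      rw [ih t (seg ++ [u])]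
      cases h : pvBnds first t (rest.map Prod.fst) with
      | nil => simp
      | cons b bs => simp [pvChop_shift]

theorem mem_pvBnds (first : Int) : ∀ (ids : List Int) (prev : Int) (k : Nat),
    k ∈ pvBnds first prev ids ↔
      k < ids.length ∧ ids.getD k 0 = first ∧ (if k = 0 then prev else ids.getD (k - 1) 0) ≠ first := by
  intro ids
  induction ids with
  | nil => intro prev k; simp [pvBnds]
  | cons t rest ih =>
    intro prev k
    cases k with
    | zero =>
      by_cases hb : prev ≠ first ∧ t = first <;> simp [pvBnds, hb] <;> tauto
    | succ m =>
      have hmem : m + 1 ∈ pvBnds first prev (t :: rest) ↔ m ∈ pvBnds first t rest := by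
        by_cases hb : prev ≠ first ∧ t = first <;> simp [pvBnds, hb]
      rw [hmem, ih t m]
      cases m <;> simp

theorem pvBnds_pairwise (first : Int) : ∀ (ids : List Int) (prev : Int),
    (pvBnds first prev ids).Pairwise (· < ·) := by
  intro ids
  induction ids with
  | nil => intro prev; simp [pvBnds]
  | cons t rest ih =>
    intro prev
    have hm : ((pvBnds first t rest).map Nat.succ).Pairwise (· < ·) :=
      (List.pairwise_map).mpr ((ih t).imp (fun h => Nat.succ_lt_succ h))
    by_cases hb : prev ≠ first ∧ t = first
    · simp only [pvBnds, if_pos hb, List.singleton_append]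
      refine List.Pairwise.cons ?_ hm
      intro x hx
      simp only [List.mem_map] at hx
      obtain ⟨a, -, rfl⟩ := hx
      omega
    · simp only [pvBnds, if_neg hb, List.nil_append]
      exact hm

theorem pvChop_zip (us : List String) : ∀ (bs : List Nat) (p : Nat),
    (((p : Int) :: bs.map (fun k : Nat => (k : Int))).zip
        (bs.map (fun k : Nat => (k : Int)) ++ [(us.length : Int)])).map
      (fun ab => PySem.List.slice us (some ab.1) (some ab.2)) = pvChop us p bs := by
  intro bs
  induction bs with
  | nil =>
    intro p
    simp [pvChop, PySem.List.slice_natCast]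
  | cons b bs ih =>
    intro p
    simp only [List.map_cons, List.cons_append, List.zip_cons_cons, pvChop,
      PySem.List.slice_natCast]
    exact congrArg _ (ih b)

theorem pvBounds_eq (f : Int) (ids : List Int) (n : Nat) (hn : n ≤ ids.length) :
    (PySem.List.pyRange 1 (n : Int) 1).filter
        (fun i => PySem.List.pyGetD ids i 0 == f && PySem.List.pyGetD ids (i - 1) 0 != f)
      = (pvBnds f f (ids.take n)).map (fun k : Nat => (k : Int)) := by
  have hlen : (ids.take n).length = n := by simp [List.length_take, Nat.min_eq_left hn]
  have htake : ∀ k : Nat, k < n → (ids.take n).getD k 0 = ids.getD k 0 := by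
    intro k hk; simp [List.getD, hk]
  have hnodup1 : ((PySem.List.pyRange 1 (n : Int) 1).filter
      (fun i => PySem.List.pyGetD ids i 0 == f && PySem.List.pyGetD ids (i - 1) 0 != f)).Nodup :=
    (PySem.List.nodup_pyRange_one 1 (n : Int)).filter _
  have hpw2 : ((pvBnds f f (ids.take n)).map (fun k : Nat => (k : Int))).Pairwise (· < ·) :=
    (List.pairwise_map).mpr ((pvBnds_pairwise f (ids.take n) f).imp (fun h => by exact_mod_cast h))
  have hpw1 : ((PySem.List.pyRange 1 (n : Int) 1).filter
      (fun i => PySem.List.pyGetD ids i 0 == f && PySem.List.pyGetD ids (i - 1) 0 != f)).Pairwise (· < ·) :=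
    (PySem.List.pairwise_lt_pyRange_one 1 (n : Int)).sublist List.filter_sublist
  have hnodup2 : ((pvBnds f f (ids.take n)).map (fun k : Nat => (k : Int))).Nodup :=
    hpw2.imp (fun h => ne_of_lt h)
  have hmem : ∀ x, (x ∈ (PySem.List.pyRange 1 (n : Int) 1).filter
      (fun i => PySem.List.pyGetD ids i 0 == f && PySem.List.pyGetD ids (i - 1) 0 != f))
      ↔ x ∈ (pvBnds f f (ids.take n)).map (fun k : Nat => (k : Int)) := by
    intro x
    rw [List.mem_filter, PySem.List.mem_pyRange_one]
    simp only [List.mem_map, Bool.and_eq_true, beq_iff_eq, bne_iff_ne]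
    constructor
    · rintro ⟨⟨h1, h2⟩, hpa, hpb⟩
      lift x to Nat using (by omega) with k
      have hk1 : 1 ≤ k := by exact_mod_cast h1
      have hkn : k < n := by exact_mod_cast h2
      refine ⟨k, ?_, rfl⟩
      rw [mem_pvBnds]
      have hc : ((k : Int) - 1) = ((k - 1 : Nat) : Int) := by omega
      rw [PySem.List.pyGetD_natCast] at hpa
      rw [hc, PySem.List.pyGetD_natCast] at hpb
      refine ⟨by omega, by rw [htake k hkn]; exact hpa, ?_⟩
      rw [if_neg (by omega)]
      rw [htake (k - 1) (by omega)]
      exact hpb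
    · rintro ⟨k, hk, rfl⟩
      rw [mem_pvBnds] at hk
      obtain ⟨hklen, ha, hb⟩ := hk
      have hkn : k < n := by omega
      have hk0 : k ≠ 0 := by
        intro h0; rw [if_pos h0] at hb; exact hb rfl
      rw [if_neg hk0] at hb
      refine ⟨⟨by exact_mod_cast Nat.one_le_iff_ne_zero.mpr hk0, by exact_mod_cast hkn⟩, ?_, ?_⟩
      · rw [PySem.List.pyGetD_natCast, ← htake k hkn]; exact ha
      · have hc : ((k : Int) - 1) = ((k - 1 : Nat) : Int) := by omega
        rw [hc, PySem.List.pyGetD_natCast, ← htake (k - 1) (by omega)]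
        exact hb
  exact ((List.perm_ext_iff_of_nodup hnodup1 hnodup2).mpr hmem).eq_of_pairwise
    (fun a b _ _ hab hba => absurd (lt_trans hab hba) (lt_irrefl a)) hpw1 hpw2

-- ===== VERDICT (by name: the statement is the Claim_ definition above) =====
theorem split_segment_by_turn_spec : Claim_equal_split_segment_by_turn := by
  intro u ids _ hpre
  unfold Spec_split_segment_by_turn
  cases ids with
  | nil => exact absurd rfl hpre
  | cons f rest =>
    have hget : PySem.List.pyGet? (f :: rest) (0 : Int) = some f := by
      simp [PySem.List.pyGet?, PySem.List.pyIdx?]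
    set ids := f :: rest with hids
    set n : Nat := min ids.length u.length with hn
    have hn1 : n ≤ ids.length := Nat.min_le_left _ _
    have hn2 : n ≤ u.length := Nat.min_le_right _ _
    have hlen1 : (ids.take n).length = n := by simp [List.length_take, Nat.min_eq_left hn1]
    have hlen2 : (u.take n).length = n := by simp [List.length_take, Nat.min_eq_left hn2]
    -- A side: stateful loop = segsAux = cut at the boundary positions
    have hA : split_segment_by_turn u ids = segsAux f f [] (ids.zip u) := by
      unfold split_segment_by_turn
      rw [hget]
      have := pvA_loop_eq f (ids.zip u) [] [] f
      simpa using this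
    have hzip : ids.zip u = (ids.take n).zip (u.take n) :=
      List.zip_eq_zip_take_min (l₁ := ids) (l₂ := u)
    have hfst : (ids.zip u).map Prod.fst = ids.take n := by
      rw [hzip]; exact List.map_fst_zip (by rw [hlen1, hlen2])
    have hsnd : (ids.zip u).map Prod.snd = u.take n := by
      rw [hzip]; exact List.map_snd_zip (by rw [hlen1, hlen2])
    -- B side: reduce to the same cut form
    have hB : split_segment_by_turn_alt u ids =
        (((0 : Int) :: (pvBnds f f (ids.take n)).map (fun k : Nat => (k : Int))).zip
            ((pvBnds f f (ids.take n)).map (fun k : Nat => (k : Int)) ++ [(n : Int)])).map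
          (fun ab => PySem.List.slice (u.take n) (some ab.1) (some ab.2)) := by
      unfold split_segment_by_turn_alt
      rw [hget]
      have hmin : min ((ids.length : Int)) ((u.length : Int)) = (n : Int) := by
        rw [hn]; push_cast; rfl
      simp only [hmin, PySem.List.slice_to_natCast, pvBounds_eq f ids n hn1]
    rw [hA, hB, segsAux_eq_chop f (ids.zip u) f [], hfst, hsnd]
    have hcast0 : (0 : Int) = ((0 : Nat) : Int) := rfl
    have hcastn : (n : Int) = (((u.take n).length : Nat) : Int) := by rw [hlen2]
    rw [hcast0, hcastn, pvChop_zip (u.take n) (pvBnds f f (ids.take n)) 0]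
    cases h : pvBnds f f (ids.take n) with
    | nil => simp [pvChop]
    | cons b bs => simp [pvChop]
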